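-- pv_equiv track=rewrite | github.com/Yepavlov/Python_pro_class | HW_19/task_2_from_CW.py | dist_same_letter
-- ===== SOURCE A (Python) =====
-- def dist_same_letter(st: str) -> str:
--     max_distance = 0
--     max_letter = ""
--     letter_position = {}
--
--     for i, letter in enumerate(st):
--         if letter in letter_position:
--             distance = i - letter_position[letter]
--             if distance > max_distance:
--                 max_distance = distance
--                 max_letter = letter
--         else:
--             letter_position[letter] = i
--
--     return max_letter + str(max_distance + 1)
-- ===== SOURCE B (Python) =====
-- def dist_same_letter(st: str) -> str:
--     occ = {}
--     for i, ch in enumerate(st):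
--         if ch in occ:
--             occ[ch] = (occ[ch][0], i)
--         else:
--             occ[ch] = (i, i)
--     max_distance = 0
--     max_letter = ""
--     for ch, (first, last) in occ.items():
--         span = last - first
--         if span > max_distance:
--             max_distance = span
--             max_letter = ch
--     return max_letter + str(max_distance + 1)
-- ===== Notes on version B (the rewrite author's own statement) =====
-- stated objective: alternative
-- what changed: A keeps a running maximum updated online at every repeated occurrence; B decomposes into two phases: one pass builds a dict of (first,last) occurrence pairs, then a separate loop over the dict items picks the letter with the strictly maximal span.
import Mathlib
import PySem

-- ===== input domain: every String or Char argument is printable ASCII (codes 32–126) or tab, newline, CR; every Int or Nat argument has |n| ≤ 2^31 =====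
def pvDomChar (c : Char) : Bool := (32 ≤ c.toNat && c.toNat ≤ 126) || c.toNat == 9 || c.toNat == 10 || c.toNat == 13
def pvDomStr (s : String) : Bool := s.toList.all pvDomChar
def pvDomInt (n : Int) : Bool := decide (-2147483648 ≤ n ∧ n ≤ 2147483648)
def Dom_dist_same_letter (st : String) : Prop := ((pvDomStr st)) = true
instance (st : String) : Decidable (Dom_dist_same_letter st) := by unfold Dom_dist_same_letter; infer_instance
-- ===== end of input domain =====

-- B replaces A's online running-maximum with a two-phase decomposition (build a dict of
-- (first,last) occurrence pairs, then scan the dict items for the maximal span); same cost.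


-- ===== PORT A =====
-- one step of A's loop body: state = (max_distance, max_letter, letter_position)
def stepA (s : Int × List Char × PySem.Dict Char Int) (p : Int × Char) :
    Int × List Char × PySem.Dict Char Int :=
  if s.2.2.contains p.2 then
    if p.1 - s.2.2.getD p.2 0 > s.1 then (p.1 - s.2.2.getD p.2 0, [p.2], s.2.2) else s
  else (s.1, s.2.1, s.2.2.insert p.2 p.1)

def dist_same_letter (st : String) : String :=
  let r := (PySem.List.enumerate st.toList 0).foldl stepA (0, [], PySem.Dict.empty)
  String.ofList (r.2.1 ++ PySem.Int.toChars (r.1 + 1))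

-- ===== PORT B =====
-- first loop of B: record the (first, last) occurrence indices of each letter
def stepB1 (occ : PySem.Dict Char (Int × Int)) (p : Int × Char) : PySem.Dict Char (Int × Int) :=
  if occ.contains p.2 then occ.insert p.2 ((occ.getD p.2 (0, 0)).1, p.1)
  else occ.insert p.2 (p.1, p.1)

-- second loop of B: keep the letter with the strictly maximal span last - first
def stepB2 (s : Int × List Char) (it : Char × Int × Int) : Int × List Char :=
  if it.2.2 - it.2.1 > s.1 then (it.2.2 - it.2.1, [it.1]) else s

def dist_same_letter_alt (st : String) : String :=
  let occ := (PySem.List.enumerate st.toList 0).foldl stepB1 PySem.Dict.empty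
  let r := occ.items.foldl stepB2 (0, ([] : List Char))
  String.ofList (r.2 ++ PySem.Int.toChars (r.1 + 1))

-- ===== PRECONDITION & SPEC =====
def Spec_dist_same_letter (st : String) (out : String) : Prop := out = dist_same_letter_alt st
instance (st : String) (out : String) : Decidable (Spec_dist_same_letter st out) := by unfold Spec_dist_same_letter; infer_instance

-- ===== CLAIM (what is proved, stated in full; the proofs are below) =====
def Claim_equal_dist_same_letter : Prop := ∀ (st : String), Dom_dist_same_letter st → Spec_dist_same_letter st (dist_same_letter st)

-- ===== LEMMAS AND PROOFS =====

-- the running maximum of B's second loop never decreases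
lemma foldB2_fst_ge (I : List (Char × Int × Int)) (s : Int × List Char) :
    s.1 ≤ (I.foldl stepB2 s).1 := by
  induction I generalizing s with
  | nil => simp
  | cons p I ih =>
    refine le_trans ?_ (ih (stepB2 s p))
    simp only [stepB2]
    split <;> omega

-- the running maximum is bounded by any common bound on the state and the spans
lemma foldB2_fst_le (I : List (Char × Int × Int)) (s : Int × List Char) (c : Int)
    (hs : s.1 ≤ c) (hI : ∀ p ∈ I, p.2.2 - p.2.1 ≤ c) :
    (I.foldl stepB2 s).1 ≤ c := by
  induction I generalizing s with
  | nil => simpa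
  | cons p I ih =>
    simp only [List.foldl_cons]
    refine ih _ ?_ (fun q hq => hI q (by simp [hq]))
    simp only [stepB2]
    split
    · exact hI p (by simp)
    · exact hs

-- B's second loop ignores items whose span does not exceed the current maximum
lemma foldB2_const (I : List (Char × Int × Int)) (s : Int × List Char)
    (hI : ∀ p ∈ I, p.2.2 - p.2.1 ≤ s.1) :
    I.foldl stepB2 s = s := by
  induction I with
  | nil => rfl
  | cons p I ih =>
    simp only [List.foldl_cons, stepB2]
    rw [if_neg (by have := hI p (by simp); omega)]
    exact ih (fun q hq => hI q (by simp [hq]))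

-- MAIN INVARIANT: while scanning the rest of the string from index n, A's running state
-- (max, letter, first-occurrence dict) is determined by B's (first,last) dict
lemma main_inv (l : List Char) (n : Int) (d : PySem.Dict Char (Int × Int))
    (pos : PySem.Dict Char Int) (maxd : Int) (maxl : List Char)
    (hnd : d.keys.Nodup)
    (hbd : ∀ p ∈ d.items, p.2.1 ≤ p.2.2 ∧ p.2.2 < n)
    (hpw : (d.items.map (fun p => p.2.1)).Pairwise (· < ·))
    (hpos : pos.items = d.items.map (fun p => (p.1, p.2.1)))
    (hR : (maxd, maxl) = d.items.foldl stepB2 (0, ([] : List Char))) :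
    ((((PySem.List.enumerate l n).foldl stepA (maxd, maxl, pos)).1,
      ((PySem.List.enumerate l n).foldl stepA (maxd, maxl, pos)).2.1)
      = ((PySem.List.enumerate l n).foldl stepB1 d).items.foldl stepB2 (0, ([] : List Char))) := by
  induction l generalizing n d pos maxd maxl with
  | nil => simpa using hR
  | cons ch l ih =>
    rw [PySem.List.enumerate_cons]
    simp only [List.foldl_cons]
    have hkeys : pos.keys = d.keys := by
      show pos.items.map (·.1) = d.items.map (·.1)
      rw [hpos, List.map_map]
      rfl
    have hcont : pos.contains ch = d.contains ch := by
      rw [PySem.Dict.contains_eq_decide_mem_keys, PySem.Dict.contains_eq_decide_mem_keys, hkeys]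
    by_cases hc : d.contains ch = true
    · -- repeated letter: A compares n - first(ch) with its max, B overwrites last(ch) with n
      obtain ⟨v, hv⟩ : ∃ v, d.get? ch = some v := by
        have h := (PySem.Dict.contains_eq_isSome_get? d ch).symm.trans hc
        exact Option.isSome_iff_exists.mp h
      have hmem : (ch, v) ∈ d.items := PySem.Dict.mem_items_of_get?_eq_some _ hv
      have hgetD : d.getD ch (0, 0) = v := PySem.Dict.getD_of_get?_eq_some _ _ hv
      have hndpos : pos.keys.Nodup := hkeys ▸ hnd
      have hposmem : (ch, v.1) ∈ pos.items := by
        rw [hpos]; exact List.mem_map.mpr ⟨(ch, v), hmem, rfl⟩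
      have hposgetD : pos.getD ch 0 = v.1 := PySem.Dict.getD_of_mem_items _ hposmem hndpos 0
      have hB1 : stepB1 d (n, ch) = d.insert ch (v.1, n) := by
        simp only [stepB1, hc, if_true, hgetD]
      obtain ⟨I1, I2, hsplit⟩ := List.append_of_mem hmem
      have hkeysplit : d.keys = I1.map (·.1) ++ ch :: I2.map (·.1) := by
        show d.items.map (·.1) = _
        rw [hsplit]; simp
      have hndsplit : (I1.map (·.1) ++ ch :: I2.map (·.1)).Nodup := hkeysplit ▸ hnd
      have h1fresh : ∀ p ∈ I1, p.1 ≠ ch := by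
        intro p hp heq
        exact (List.nodup_append.mp hndsplit).2.2 p.1 (List.mem_map_of_mem hp) ch
          (List.mem_cons_self ..) heq
      have h2fresh : ∀ p ∈ I2, p.1 ≠ ch := by
        intro p hp heq
        have h := ((List.nodup_append.mp hndsplit).2.1)
        exact (List.nodup_cons.mp h).1 (heq ▸ List.mem_map_of_mem hp)
      have h2first : ∀ p ∈ I2, v.1 < p.2.1 := by
        intro p hp
        have h := hpw
        rw [hsplit] at h
        simp only [List.map_append, List.map_cons] at h
        have h2 := (List.pairwise_append.mp h).2.1
        exact (List.pairwise_cons.mp h2).1 _ (List.mem_map_of_mem hp)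
      have e1 : I1.map (fun p => if p.1 == ch then (ch, (v.1, n)) else p) = I1 := by
        conv_rhs => rw [← List.map_id I1]
        exact List.map_congr_left (fun p hp => by simp [h1fresh p hp])
      have e2 : I2.map (fun p => if p.1 == ch then (ch, (v.1, n)) else p) = I2 := by
        conv_rhs => rw [← List.map_id I2]
        exact List.map_congr_left (fun p hp => by simp [h2fresh p hp])
      have hitems2 : (d.insert ch (v.1, n)).items = I1 ++ (ch, (v.1, n)) :: I2 := by
        rw [PySem.Dict.items_insert_of_contains _ _ hc, hsplit]
        simp only [List.map_append, List.map_cons, e1, e2, BEq.rfl, if_true]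
      have hnd2 : (d.insert ch (v.1, n)).keys.Nodup := PySem.Dict.nodup_keys_insert _ _ _ hnd
      have hbd2 : ∀ p ∈ (d.insert ch (v.1, n)).items, p.2.1 ≤ p.2.2 ∧ p.2.2 < n + 1 := by
        intro p hp
        rcases (PySem.Dict.mem_items_insert ..).mp hp with h | ⟨h, _⟩
        · have hvb : v.1 ≤ v.2 ∧ v.2 < n := hbd _ hmem
          subst h; exact ⟨by simp; omega, by simp⟩
        · have hb := hbd p h; omega
      have hpw2 : ((d.insert ch (v.1, n)).items.map (fun p => p.2.1)).Pairwise (· < ·) := by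
        have hfirsts : (d.insert ch (v.1, n)).items.map (fun p => p.2.1)
            = d.items.map (fun p => p.2.1) := by
          rw [hitems2, hsplit]; simp
        rw [hfirsts]; exact hpw
      have hpos2 : pos.items = (d.insert ch (v.1, n)).items.map (fun p => (p.1, p.2.1)) := by
        rw [hitems2, hpos, hsplit]; simp
      set s1 := I1.foldl stepB2 (0, ([] : List Char)) with hs1
      have hold : (maxd, maxl) = I2.foldl stepB2 (stepB2 s1 (ch, v)) := by
        rw [hR, hsplit, List.foldl_append, List.foldl_cons]
      have hvb : v.1 ≤ v.2 ∧ v.2 < n := hbd _ hmem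
      have hsv : stepB2 s1 (ch, v) = if v.2 - v.1 > s1.1 then (v.2 - v.1, [ch]) else s1 := rfl
      have hsv2 : stepB2 s1 (ch, (v.1, n)) = if n - v.1 > s1.1 then (n - v.1, [ch]) else s1 := rfl
      have hI2span : ∀ p ∈ I2, p.2.2 - p.2.1 < n - v.1 := by
        intro p hp
        have hb := hbd p (by rw [hsplit]; simp [hp])
        have hf := h2first p hp
        omega
      by_cases hgt : n - v.1 > s1.1
      · -- the new span strictly exceeds everything seen: both sides pick ch
        have hnew : (d.insert ch (v.1, n)).items.foldl stepB2 (0, ([] : List Char))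
            = (n - v.1, [ch]) := by
          rw [hitems2, List.foldl_append, List.foldl_cons, ← hs1]
          rw [hsv2, if_pos (by omega)]
          exact foldB2_const _ _ (fun p hp => le_of_lt (hI2span p hp))
        have hmaxlt : maxd < n - v.1 := by
          have hle : (I2.foldl stepB2 (stepB2 s1 (ch, v))).1 ≤ n - v.1 - 1 := by
            apply foldB2_fst_le
            · rw [hsv]; split <;> omega
            · intro p hp; have := hI2span p hp; omega
          have hfst : maxd = (I2.foldl stepB2 (stepB2 s1 (ch, v))).1 := congrArg Prod.fst hold
          omega
        have hstepA : stepA (maxd, maxl, pos) (n, ch) = (n - v.1, [ch], pos) := by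
          simp only [stepA, hcont, hc, if_true, hposgetD]
          rw [if_pos (by omega)]
        rw [hstepA, hB1]
        exact ih (n + 1) _ pos (n - v.1) [ch] hnd2 hbd2 hpw2 hpos2 hnew.symm
      · -- the new span does not exceed an earlier maximum: both sides keep it
        have h2step : stepB2 s1 (ch, v) = s1 := by
          rw [hsv, if_neg (by omega)]
        have hnew : (d.insert ch (v.1, n)).items.foldl stepB2 (0, ([] : List Char))
            = (maxd, maxl) := by
          rw [hitems2, List.foldl_append, List.foldl_cons, ← hs1]
          rw [hsv2, if_neg (by omega), hold, h2step]
        have hmaxge : n - v.1 ≤ maxd := by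
          have hfst : maxd = (I2.foldl stepB2 (stepB2 s1 (ch, v))).1 := congrArg Prod.fst hold
          rw [h2step] at hfst
          have := foldB2_fst_ge I2 s1
          omega
        have hstepA : stepA (maxd, maxl, pos) (n, ch) = (maxd, maxl, pos) := by
          simp only [stepA, hcont, hc, if_true, hposgetD]
          rw [if_neg (by omega)]
        rw [hstepA, hB1]
        exact ih (n + 1) _ pos maxd maxl hnd2 hbd2 hpw2 hpos2 hnew.symm
    · -- fresh letter: both sides append it, the maximum is unchanged (span 0)
      have hcf : d.contains ch = false := by
        rw [Bool.not_eq_true] at hc; exact hc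
      have hposcf : pos.contains ch = false := by rw [hcont]; exact hcf
      have hB1 : stepB1 d (n, ch) = d.insert ch (n, n) := by
        simp only [stepB1, hcf]; rfl
      have hstepA : stepA (maxd, maxl, pos) (n, ch) = (maxd, maxl, pos.insert ch n) := by
        simp only [stepA, hcont, hcf]; rfl
      have hitems2 : (d.insert ch (n, n)).items = d.items ++ [(ch, (n, n))] :=
        PySem.Dict.items_insert_of_not_contains _ _ hcf
      have h0 : 0 ≤ maxd := by
        have h := foldB2_fst_ge d.items (0, ([] : List Char))
        rw [← hR] at h
        exact h
      have hnew : (d.insert ch (n, n)).items.foldl stepB2 (0, ([] : List Char))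
          = (maxd, maxl) := by
        rw [hitems2, List.foldl_append, ← hR, List.foldl_cons, List.foldl_nil]
        simp only [stepB2]
        rw [if_neg (by omega)]
      have hnd2 : (d.insert ch (n, n)).keys.Nodup := PySem.Dict.nodup_keys_insert _ _ _ hnd
      have hbd2 : ∀ p ∈ (d.insert ch (n, n)).items, p.2.1 ≤ p.2.2 ∧ p.2.2 < n + 1 := by
        intro p hp
        rcases (PySem.Dict.mem_items_insert ..).mp hp with h | ⟨h, _⟩
        · subst h; simp
        · have hb := hbd p h; omega
      have hpw2 : ((d.insert ch (n, n)).items.map (fun p => p.2.1)).Pairwise (· < ·) := by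
        rw [hitems2, List.map_append]
        refine List.pairwise_append.mpr ⟨hpw, by simp, ?_⟩
        intro x hx y hy
        obtain ⟨p, hp, rfl⟩ := List.mem_map.mp hx
        simp only [List.map_cons, List.map_nil, List.mem_singleton] at hy
        have hb := hbd p hp
        omega
      have hpos2 : (pos.insert ch n).items
          = (d.insert ch (n, n)).items.map (fun p => (p.1, p.2.1)) := by
        rw [PySem.Dict.items_insert_of_not_contains _ _ hposcf, hitems2, hpos]; simp
      rw [hstepA, hB1]
      exact ih (n + 1) _ _ maxd maxl hnd2 hbd2 hpw2 hpos2 hnew.symm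

-- ===== VERDICT (by name: the statement is the Claim_ definition above) =====
theorem dist_same_letter_spec : Claim_equal_dist_same_letter := by
  intro st _
  simp only [Spec_dist_same_letter, dist_same_letter, dist_same_letter_alt]
  have h := main_inv st.toList 0 PySem.Dict.empty PySem.Dict.empty 0 []
    (by decide) (by intro p hp; cases hp) List.Pairwise.nil rfl rfl
  have h1 := congrArg Prod.fst h
  have h2 := congrArg Prod.snd h
  simp only at h1 h2
  rw [h1, h2]
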